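-- pv_equiv track=rewrite | github.com/AdaCore/gnat-llvm | llvm/py/common.py | ada_name_from_camelcase
-- ===== SOURCE A (Python) =====
-- def ada_name_from_camelcase(cpp_name_p, prefix="", suffix=""):
--     out = ""
--     upper_group = ""
--
--     cpp_name = list(cpp_name_p)
--     cpp_name[0] = cpp_name[0].upper()
--     for c in cpp_name:
--         if c.isupper() or c.isdigit():
--             upper_group += c
--         else:
--             if upper_group:
--                 if upper_group[0:-1]:
--                     upper_group = upper_group[0:-1] + "_" + upper_group[-1]
--                 if out:
--                     out += "_"
--                 out += upper_group
--                 upper_group = ""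
--             out += c
--
--     if upper_group:
--         if out:
--             out += "_"
--         out += upper_group
--
--     return out
-- ===== SOURCE B (Python) =====
-- def ada_name_from_camelcase(cpp_name_p, prefix="", suffix=""):
--     def is_up(c):
--         return c.isupper() or c.isdigit()
--
--     # uppercase the first character (raises IndexError on "" just as reading
--     # the first character does)
--     s = cpp_name_p[0].upper() + cpp_name_p[1:]
--
--     pieces = []
--     i, n = 0, len(s)
--     while i < n:
--         j = i
--         if is_up(s[i]):
--             while j < n and is_up(s[j]):
--                 j += 1
--             tok = s[i:j]
--             if j < n and len(tok) >= 2: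
--                 tok = tok[:-1] + "_" + tok[-1]
--             if pieces:
--                 pieces.append("_")
--             pieces.append(tok)
--         else:
--             while j < n and not is_up(s[j]):
--                 j += 1
--             pieces.append(s[i:j])
--         i = j
--     return "".join(pieces)
-- ===== Notes on version B (the rewrite author's own statement) =====
-- stated objective: alternative
-- what changed: A appends character by character while carrying an upper_group accumulator that is flushed and patched on each case change; B scans the string one maximal run at a time (span of upper/digit chars vs. span of others), formats each whole token directly and joins the pieces, so there is no cross-iteration accumulator state.
import Mathlib
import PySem

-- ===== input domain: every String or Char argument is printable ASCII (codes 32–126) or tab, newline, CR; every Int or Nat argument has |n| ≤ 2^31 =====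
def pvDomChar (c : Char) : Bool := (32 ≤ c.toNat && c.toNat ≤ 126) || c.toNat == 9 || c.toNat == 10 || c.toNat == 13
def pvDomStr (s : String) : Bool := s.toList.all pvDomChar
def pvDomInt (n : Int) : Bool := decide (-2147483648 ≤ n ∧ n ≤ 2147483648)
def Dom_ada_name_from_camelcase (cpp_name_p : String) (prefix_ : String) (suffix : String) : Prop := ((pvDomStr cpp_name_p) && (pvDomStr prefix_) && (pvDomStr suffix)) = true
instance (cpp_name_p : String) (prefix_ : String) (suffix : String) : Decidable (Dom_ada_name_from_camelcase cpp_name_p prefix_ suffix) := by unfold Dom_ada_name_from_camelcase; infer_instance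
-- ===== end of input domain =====

-- B replaces A's char-by-char accumulator loop by a run-at-a-time scan (spans of
-- upper/digit vs. other chars), a different decomposition of the same task; not faster.

-- ===== PORT A =====
-- c.isupper() or c.isdigit()
def pvUp (c : Char) : Bool := PySem.Chars.isupper c || PySem.Chars.isdigit c

-- loop body of A; state = (out, upper_group) as char lists
def pvStepA (st : List Char × List Char) (c : Char) : List Char × List Char :=
  if pvUp c then (st.1, st.2 ++ [c])
  else
    if st.2 ≠ [] then
      -- upper_group[0:-1] is dropLast, upper_group[-1] is getLast!
      let ug := if st.2.dropLast ≠ [] then st.2.dropLast ++ '_' :: [st.2.getLast!] else st.2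
      let out := if st.1 ≠ [] then st.1 ++ ['_'] else st.1
      (out ++ ug ++ [c], [])
    else (st.1 ++ [c], [])

-- the trailing 'if upper_group:' block of A
def pvFinA (st : List Char × List Char) : List Char :=
  if st.2 ≠ [] then (if st.1 ≠ [] then st.1 ++ ['_'] else st.1) ++ st.2 else st.1

def ada_name_from_camelcase (cpp_name_p : String) (prefix_ : String) (suffix : String) : String :=
  match cpp_name_p.toList with
  | [] => ""   -- Python raises IndexError here (cpp_name[0]); excluded by Pre_
  | c :: rest =>
    String.ofList (pvFinA ((PySem.Chars.upperChar c :: rest).foldl pvStepA ([], [])))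

-- ===== PORT B =====
-- token fix of Source B: underscore before last char when another run follows and len ≥ 2
def pvTokB (tok rest : List Char) : List Char :=
  if rest ≠ [] ∧ 2 ≤ tok.length then tok.dropLast ++ '_' :: [tok.getLast!] else tok

-- Source B's while loop: consume one maximal run per step
def pvGoB : List Char → List Char → List Char
  | pieces, [] => pieces
  | pieces, c :: cs =>
    if pvUp c then
      let tok := (c :: cs).takeWhile pvUp
      let rest := (c :: cs).dropWhile pvUp
      pvGoB ((if pieces ≠ [] then pieces ++ ['_'] else pieces) ++ pvTokB tok rest) rest
    else
      pvGoB (pieces ++ (c :: cs).takeWhile (fun d => !pvUp d)) ((c :: cs).dropWhile (fun d => !pvUp d))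
  termination_by _ s => s.length
  decreasing_by
    · simp_all
      exact List.length_dropWhile_le _ _
    · simp_all
      exact List.length_dropWhile_le _ _

def ada_name_from_camelcase_alt (cpp_name_p : String) (prefix_ : String) (suffix : String) : String :=
  match cpp_name_p.toList with
  | [] => ""   -- Python raises IndexError here; excluded by Pre_
  | c :: rest =>
    String.ofList (pvGoB [] (PySem.Chars.upperChar c :: rest))

-- ===== PRECONDITION & SPEC =====
-- Pre_ excludes only the empty string, on which both A and B raise IndexError
def Pre_ada_name_from_camelcase (cpp_name_p : String) (prefix_ : String) (suffix : String) : Prop :=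
  cpp_name_p ≠ ""
instance (cpp_name_p : String) (prefix_ : String) (suffix : String) : Decidable (Pre_ada_name_from_camelcase cpp_name_p prefix_ suffix) := by unfold Pre_ada_name_from_camelcase; infer_instance
def pvWitness_ada_name_from_camelcase : String × String × String := ("getXMLNodeID", "", "")

def Spec_ada_name_from_camelcase (cpp_name_p : String) (prefix_ : String) (suffix : String) (out : String) : Prop := out = ada_name_from_camelcase_alt cpp_name_p prefix_ suffix
instance (cpp_name_p : String) (prefix_ : String) (suffix : String) (out : String) : Decidable (Spec_ada_name_from_camelcase cpp_name_p prefix_ suffix out) := by unfold Spec_ada_name_from_camelcase; infer_instance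

-- ===== CLAIM (what is proved, stated in full; the proofs are below) =====
def Claim_equal_ada_name_from_camelcase : Prop := ∀ (cpp_name_p : String) (prefix_ : String) (suffix : String), Dom_ada_name_from_camelcase cpp_name_p prefix_ suffix → Pre_ada_name_from_camelcase cpp_name_p prefix_ suffix → Spec_ada_name_from_camelcase cpp_name_p prefix_ suffix (ada_name_from_camelcase cpp_name_p prefix_ suffix)

-- ===== LEMMAS AND PROOFS =====

-- A's loop over a run of non-upper chars with empty upper_group appends them to out
theorem pvFoldLow (t r out : List Char) (h : ∀ c ∈ t, pvUp c = false) :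
    (t ++ r).foldl pvStepA (out, []) = r.foldl pvStepA (out ++ t, []) := by
  induction t generalizing out with
  | nil => simp
  | cons c t ih =>
    have hc : pvUp c = false := h c (by simp)
    have hstep : pvStepA (out, []) c = (out ++ [c], []) := by simp [pvStepA, hc]
    simp only [List.cons_append, List.foldl_cons, hstep]
    rw [ih _ (fun d hd => h d (by simp [hd]))]
    simp

-- A's loop over a run of upper chars extends upper_group
theorem pvFoldUp (t r out ug : List Char) (h : ∀ c ∈ t, pvUp c = true) :
    (t ++ r).foldl pvStepA (out, ug) = r.foldl pvStepA (out, ug ++ t) := by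
  induction t generalizing ug with
  | nil => simp
  | cons c t ih =>
    have hc : pvUp c = true := h c (by simp)
    have hstep : pvStepA (out, ug) c = (out, ug ++ [c]) := by simp [pvStepA, hc]
    simp only [List.cons_append, List.foldl_cons, hstep]
    rw [ih _ (fun d hd => h d (by simp [hd]))]
    simp

-- pushing one non-upper char into the pieces accumulator commutes with pvGoB
theorem pvGoB_shift (p r : List Char) (c : Char) (hc : pvUp c = false) :
    pvGoB p (c :: r) = pvGoB (p ++ [c]) r := by
  cases r with
  | nil => simp [pvGoB, hc]
  | cons d r =>
    by_cases hd : pvUp d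
    · simp [pvGoB, hc, hd]
    · simp only [pvGoB, hc, Bool.false_eq_true, List.takeWhile_cons,
        List.dropWhile_cons]
      simp [hd]

-- main invariant: finishing A's fold from (out, []) equals B's run loop
theorem pvMainAux : ∀ (n : Nat) (s : List Char), s.length ≤ n →
    ∀ out, pvFinA (s.foldl pvStepA (out, [])) = pvGoB out s := by
  intro n
  induction n with
  | zero =>
    intro s hs out
    have hnil : s = [] := by cases s <;> simp_all
    subst hnil; simp [pvFinA, pvGoB]
  | succ n ih =>
    intro s hs out
    cases s with
    | nil => simp [pvFinA, pvGoB]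
    | cons c cs =>
      simp only [List.length_cons] at hs
      by_cases hc : pvUp c
      · -- upper run
        have hsplit := List.takeWhile_append_dropWhile (p := pvUp) (l := c :: cs)
        set tok := (c :: cs).takeWhile pvUp with htok
        set rest := (c :: cs).dropWhile pvUp with hrest
        have htokmem : ∀ d ∈ tok, pvUp d = true := fun d hd => List.mem_takeWhile_imp hd
        have htokne : tok ≠ [] := by simp [htok, hc]
        have hrlen : rest.length ≤ cs.length := by
          rw [hrest]; simp only [List.dropWhile_cons, hc, if_pos]
          exact List.length_dropWhile_le _ _
        have h1 : (c :: cs).foldl pvStepA (out, []) = rest.foldl pvStepA (out, tok) := by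
          conv_lhs => rw [← hsplit]
          rw [pvFoldUp _ _ _ _ htokmem]; simp
        rw [h1]
        cases hr : rest with
        | nil =>
          simp only [List.foldl_nil, pvFinA, pvGoB, hc, if_pos]
          rw [← htok, ← hrest, hr]
          simp [pvTokB, pvGoB, htokne]
        | cons d r =>
          have hd : pvUp d = false := by
            have := List.head?_dropWhile_not pvUp (c :: cs)
            rw [← hrest, hr] at this; simpa using this
          have hstep : pvStepA (out, tok) d
              = ((if out ≠ [] then out ++ ['_'] else out)
                  ++ (if tok.dropLast ≠ [] then tok.dropLast ++ '_' :: [tok.getLast!] else tok)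
                  ++ [d], []) := by
            simp [pvStepA, hd, htokne]
          have hlen2 : tok.dropLast ≠ [] ↔ 2 ≤ tok.length := by
            rw [← List.length_pos_iff_ne_nil, List.length_dropLast]
            omega
          have hfix : pvTokB tok rest
              = (if tok.dropLast ≠ [] then tok.dropLast ++ '_' :: [tok.getLast!] else tok) := by
            by_cases h2 : 2 ≤ tok.length
            · simp [pvTokB, hr, h2, hlen2.mpr h2]
            · have h3 : tok.dropLast = [] := by
                by_contra hh; exact h2 (hlen2.mp hh)
              simp [pvTokB, hr, h2, h3]
          rw [List.foldl_cons, hstep]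
          have hr' : r.length ≤ n := by
            have : rest.length = r.length + 1 := by rw [hr]; simp
            omega
          have ihr := ih r hr' ((if out ≠ [] then out ++ ['_'] else out)
              ++ (if tok.dropLast ≠ [] then tok.dropLast ++ '_' :: [tok.getLast!] else tok) ++ [d])
          rw [ihr]
          have hgo : pvGoB out (c :: cs)
              = pvGoB ((if out ≠ [] then out ++ ['_'] else out) ++ pvTokB tok rest) rest := by
            simp only [pvGoB, hc, if_pos, ← htok, ← hrest]
          rw [hgo, hfix, hr, pvGoB_shift _ _ _ hd]
      · -- lower run
        have hsplit := List.takeWhile_append_dropWhile (p := fun d => !pvUp d) (l := c :: cs)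
        set t := (c :: cs).takeWhile (fun d => !pvUp d) with ht
        set r := (c :: cs).dropWhile (fun d => !pvUp d) with hrr
        have htm : ∀ d ∈ t, pvUp d = false := by
          intro d hd
          have := List.mem_takeWhile_imp hd
          simpa using this
        have h1 : (c :: cs).foldl pvStepA (out, []) = r.foldl pvStepA (out ++ t, []) := by
          conv_lhs => rw [← hsplit]
          exact pvFoldLow _ _ _ htm
        have hr' : r.length ≤ n := by
          have : r.length ≤ cs.length := by
            rw [hrr]; simp only [List.dropWhile_cons, hc]
            simpa using List.length_dropWhile_le (fun d => !pvUp d) cs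
          omega
        rw [h1, ih r hr' (out ++ t)]
        simp only [pvGoB, hc, Bool.false_eq_true, ← ht, ← hrr]
        simp

theorem pvMain (s out : List Char) :
    pvFinA (s.foldl pvStepA (out, [])) = pvGoB out s :=
  pvMainAux s.length s le_rfl out

-- ===== VERDICT (by name: the statement is the Claim_ definition above) =====
theorem ada_name_from_camelcase_spec : Claim_equal_ada_name_from_camelcase := by
  intro cpp prefix_ suffix _ hpre
  unfold Spec_ada_name_from_camelcase ada_name_from_camelcase ada_name_from_camelcase_alt
  cases h : cpp.toList with
  | nil => rfl
  | cons c rest =>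
    have hm := pvMain (PySem.Chars.upperChar c :: rest) []
    simp only [List.foldl_cons] at hm ⊢
    rw [hm]
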